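-- pv_equiv track=rewrite | github.com/tschmidt95/Florida_Property_Scraper | src/florida_property_scraper/scrapy_project/spiders/county_spider.py | _looks_like_address
-- ===== SOURCE A (Python) =====
-- def _looks_like_address(value: str) -> bool:
--     if not value:
--         return False
--     if " " not in value:
--         return False
--     has_digit = any(ch.isdigit() for ch in value)
--     has_letter = any(ch.isalpha() for ch in value)
--     return has_digit and has_letter
-- ===== SOURCE B (Python) =====
-- def _looks_like_address(value: str) -> bool:
--     has_space = has_digit = has_letter = False
--     for ch in value:
--         if ch == " ":
--             has_space = True
--         if ch.isdigit():
--             has_digit = True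
--         if ch.isalpha():
--             has_letter = True
--         if has_space and has_digit and has_letter:
--             return True
--     return has_space and has_digit and has_letter
-- ===== Notes on version B (the rewrite author's own statement) =====
-- stated objective: alternative
-- what changed: Replaces A's three separate passes (substring membership plus two any() scans) with one fused single-pass loop over the characters maintaining three flags, returning True as soon as all three hold.
import Mathlib
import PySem

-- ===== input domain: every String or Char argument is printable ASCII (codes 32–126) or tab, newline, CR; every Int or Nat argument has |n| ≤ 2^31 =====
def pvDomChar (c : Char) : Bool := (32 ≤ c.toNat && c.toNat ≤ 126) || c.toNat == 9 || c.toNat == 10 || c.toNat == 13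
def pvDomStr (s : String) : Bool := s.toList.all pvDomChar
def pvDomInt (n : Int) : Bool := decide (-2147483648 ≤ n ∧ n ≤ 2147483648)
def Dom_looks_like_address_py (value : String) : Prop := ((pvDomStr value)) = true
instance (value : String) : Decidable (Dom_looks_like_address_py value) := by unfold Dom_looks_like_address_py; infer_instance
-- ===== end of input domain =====

-- B fuses A's three separate scans into one single-pass loop with three flags and an early exit (alternative decomposition, same cost).

-- ===== PORT A =====
def looks_like_address_py (value : String) : Bool :=
  let cs := value.toList
  if cs.isEmpty then false
  else if !(PySem.Str.isIn " " value) then false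
  else
    let has_digit := cs.any PySem.Chars.isdigit
    let has_letter := cs.any PySem.Chars.isalpha
    has_digit && has_letter

-- ===== PORT B =====
def looksAltLoop : List Char → Bool → Bool → Bool → Bool
  | [], s, d, l => s && d && l
  | c :: rest, s, d, l =>
    let s := s || (c == ' ')
    let d := d || PySem.Chars.isdigit c
    let l := l || PySem.Chars.isalpha c
    if s && d && l then true else looksAltLoop rest s d l

def looks_like_address_py_alt (value : String) : Bool :=
  looksAltLoop value.toList false false false

-- ===== PRECONDITION & SPEC =====
def Spec_looks_like_address_py (value : String) (out : Bool) : Prop := out = looks_like_address_py_alt value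
instance (value : String) (out : Bool) : Decidable (Spec_looks_like_address_py value out) := by unfold Spec_looks_like_address_py; infer_instance

-- ===== CLAIM (what is proved, stated in full; the proofs are below) =====
def Claim_equal_looks_like_address_py : Prop := ∀ (value : String), Dom_looks_like_address_py value → Spec_looks_like_address_py value (looks_like_address_py value)

-- ===== LEMMAS AND PROOFS =====
theorem looksAltLoop_closed (cs : List Char) (s d l : Bool) :
    looksAltLoop cs s d l =
      ((s || cs.any (· == ' ')) && (d || cs.any PySem.Chars.isdigit)
        && (l || cs.any PySem.Chars.isalpha)) := by
  induction cs generalizing s d l with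
  | nil => simp [looksAltLoop]
  | cons c rest ih =>
    simp only [looksAltLoop, List.any_cons]
    split_ifs with h
    · simp_all
      tauto
    · rw [ih]
      ac_rfl

theorem isIn_space (value : String) :
    PySem.Str.isIn " " value = value.toList.any (· == ' ') := by
  by_cases h : ' ' ∈ value.toList
  · have hinf : (" ").toList <:+: value.toList := by
      obtain ⟨s, t, hst⟩ := List.append_of_mem h
      rw [hst]; exact ⟨s, t, by simp⟩
    rw [(PySem.Str.isIn_iff_infix _ _).mpr hinf]
    exact (List.any_eq_true.mpr ⟨' ', h, by simp⟩).symm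
  · have hninf : ¬ (" ").toList <:+: value.toList := by
      intro hinf; exact h (hinf.subset (by simp))
    have hf : PySem.Str.isIn " " value = false := by
      cases hb : PySem.Str.isIn " " value
      · rfl
      · exact absurd ((PySem.Str.isIn_iff_infix _ _).mp hb) hninf
    rw [hf]
    exact (List.any_eq_false.mpr (fun c hc => by simp; rintro rfl; exact h hc)).symm

-- ===== VERDICT (by name: the statement is the Claim_ definition above) =====
theorem looks_like_address_py_spec : Claim_equal_looks_like_address_py := by
  intro value _
  unfold Spec_looks_like_address_py looks_like_address_py looks_like_address_py_alt
  rw [looksAltLoop_closed, isIn_space]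
  simp only [Bool.false_or]
  cases h : value.toList with
  | nil => simp
  | cons c rest =>
    rw [List.isEmpty_cons, if_neg (by simp)]
    by_cases hsp : (c :: rest).any (· == ' ') = true
    · rw [hsp]; simp
    · rw [Bool.not_eq_true] at hsp; rw [hsp]; simp
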